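-- pv_equiv track=rewrite | github.com/arghyadeep99/minutemen-compass | backend/langgraph_agent.py | _generate_suggested_questions
-- ===== SOURCE A (Python) =====
-- from typing import Dict, List, Any, TypedDict, Annotated, Sequence, Optional
--
-- def _generate_suggested_questions(
--
--     user_message: str,
--     tool_calls: List[Dict[str, Any]],
-- ) -> List[str]:
--     """Generate contextual suggested questions"""
--     suggestions: List[str] = []
--
--     if any(tc.get("name") == "get_study_spots" for tc in tool_calls):
--         suggestions.extend(
--             [
--                 "What are good group study spaces?",
--                 "Where can I find quiet study spots?",
--             ]
--         )
--
--     if any(tc.get("name") == "get_dining_options" for tc in tool_calls):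
--         suggestions.extend(
--             [
--                 "What dining halls are open late?",
--                 "Where can I find vegetarian options?",
--             ]
--         )
--
--     if any(tc.get("name") == "get_support_resources" for tc in tool_calls):
--         suggestions.extend(
--             [
--                 "How do I contact academic support?",
--                 "What mental health resources are available?",
--             ]
--         )
--
--     if any(tc.get("name") == "get_course_info" for tc in tool_calls):
--         suggestions.extend(
--             [
--                 "What are the prerequisites for CICS 210?",
--                 "Who teaches INFO 248?",
--                 "What courses are offered in Spring 2026?",
--             ]
--         )
--
--     if not suggestions:
--         suggestions = [
--             "Find a quiet study spot",
--             "What is open for food right now?",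
--             "Mental health support resources",
--         ]
--
--     return suggestions[:3]
-- ===== SOURCE B (Python) =====
-- _Q = [
--     ("get_study_spots", [
--         "What are good group study spaces?",
--         "Where can I find quiet study spots?",
--     ]),
--     ("get_dining_options", [
--         "What dining halls are open late?",
--         "Where can I find vegetarian options?",
--     ]),
--     ("get_support_resources", [
--         "How do I contact academic support?",
--         "What mental health resources are available?",
--     ]),
--     ("get_course_info", [
--         "What are the prerequisites for CICS 210?",
--         "Who teaches INFO 248?",
--         "What courses are offered in Spring 2026?",
--     ]),
-- ]
--
-- _FALLBACK = [
--     "Find a quiet study spot",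
--     "What is open for food right now?",
--     "Mental health support resources",
-- ]
--
-- # one bit per tool, in table order
-- _BITS = {name: 1 << i for i, (name, _) in enumerate(_Q)}
--
-- # precomputed answer for every possible bitmask of present tools
-- _ANSWERS = [
--     ([q for i, (_, qs) in enumerate(_Q) if (m >> i) % 2 == 1 for q in qs] or _FALLBACK)[:3]
--     for m in range(16)
-- ]
--
--
-- def _generate_suggested_questions(user_message, tool_calls):
--     """Generate contextual suggested questions (bitmask + precomputed answer table)."""
--     m = 0
--     for tc in tool_calls:
--         m |= _BITS.get(tc.get("name"), 0)
--     return _ANSWERS[m]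
-- ===== Notes on version B (the rewrite author's own statement) =====
-- stated objective: alternative
-- what changed: Replaces the four any()-scan-and-extend branches by a single fold computing a 4-bit presence bitmask (one bit per tool via a bits dict) that indexes a precomputed table of all 16 final answer lists (fallback and [:3] already applied at table-build time).
import Mathlib
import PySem

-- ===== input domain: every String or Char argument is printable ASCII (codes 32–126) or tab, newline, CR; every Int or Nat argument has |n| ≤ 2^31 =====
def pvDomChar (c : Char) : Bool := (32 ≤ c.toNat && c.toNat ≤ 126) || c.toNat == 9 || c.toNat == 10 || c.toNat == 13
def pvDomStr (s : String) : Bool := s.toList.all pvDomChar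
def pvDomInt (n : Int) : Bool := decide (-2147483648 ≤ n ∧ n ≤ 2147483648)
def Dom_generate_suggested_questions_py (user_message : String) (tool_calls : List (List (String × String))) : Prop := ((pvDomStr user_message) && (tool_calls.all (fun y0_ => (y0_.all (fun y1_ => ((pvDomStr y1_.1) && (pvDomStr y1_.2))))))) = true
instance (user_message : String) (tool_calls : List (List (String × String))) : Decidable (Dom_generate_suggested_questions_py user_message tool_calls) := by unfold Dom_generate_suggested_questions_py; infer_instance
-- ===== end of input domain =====

-- B replaces A's four any()-branch blocks by one fold computing a 4-bit presence bitmask that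
-- indexes a precomputed table of all 16 possible answer lists (alternative decomposition).

-- shared helper: tc.get("name")
def pvTcName (tc : List (String × String)) : Option String :=
  (PySem.Dict.mk tc).get? "name"

-- ===== PORT A =====
def generate_suggested_questions_py (user_message : String) (tool_calls : List (List (String × String))) : List String :=
  let suggestions : List String := []
  let suggestions := if tool_calls.any (fun tc => pvTcName tc == some "get_study_spots") then
      suggestions ++ ["What are good group study spaces?", "Where can I find quiet study spots?"]
    else suggestions
  let suggestions := if tool_calls.any (fun tc => pvTcName tc == some "get_dining_options") then
      suggestions ++ ["What dining halls are open late?", "Where can I find vegetarian options?"]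
    else suggestions
  let suggestions := if tool_calls.any (fun tc => pvTcName tc == some "get_support_resources") then
      suggestions ++ ["How do I contact academic support?", "What mental health resources are available?"]
    else suggestions
  let suggestions := if tool_calls.any (fun tc => pvTcName tc == some "get_course_info") then
      suggestions ++ ["What are the prerequisites for CICS 210?", "Who teaches INFO 248?", "What courses are offered in Spring 2026?"]
    else suggestions
  let suggestions := if suggestions.isEmpty then
      ["Find a quiet study spot", "What is open for food right now?", "Mental health support resources"]
    else suggestions
  PySem.List.slice suggestions none (some 3)

-- ===== PORT B =====
def pvQ : List (String × List String) :=
  [("get_study_spots", ["What are good group study spaces?", "Where can I find quiet study spots?"]),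
   ("get_dining_options", ["What dining halls are open late?", "Where can I find vegetarian options?"]),
   ("get_support_resources", ["How do I contact academic support?", "What mental health resources are available?"]),
   ("get_course_info", ["What are the prerequisites for CICS 210?", "Who teaches INFO 248?", "What courses are offered in Spring 2026?"])]

def pvFallback : List String :=
  ["Find a quiet study spot", "What is open for food right now?", "Mental health support resources"]

-- _BITS = {name: 1 << i for i, (name, _) in enumerate(_Q)}
-- (masks are small non-negative Python ints; they are carried as Nat, on which |, <<, >>, % agree with Python)
def pvBits : PySem.Dict String Nat :=
  PySem.Dict.ofList ((PySem.List.enumerate pvQ).map (fun p => (p.2.1, 1 <<< p.1.toNat)))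

-- _ANSWERS[m] for every bitmask m in range(16)
def pvAnswers : List (List String) :=
  (List.range 16).map (fun m =>
    let s := (PySem.List.enumerate pvQ).flatMap
      (fun p => if (m >>> p.1.toNat) % 2 == 1 then p.2.2 else [])
    PySem.List.slice (if s.isEmpty then pvFallback else s) none (some 3))

def generate_suggested_questions_py_alt (user_message : String) (tool_calls : List (List (String × String))) : List String :=
  -- m |= _BITS.get(tc.get("name"), 0); a tc without "name" gives key None, absent from _BITS, so 0
  let m := tool_calls.foldl (fun m tc =>
    m ||| (match pvTcName tc with
           | none => 0
           | some s => pvBits.getD s 0)) 0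
  -- _ANSWERS[m]: m < 16 always, so the index is in range and the default is never taken
  (PySem.List.pyGet? pvAnswers (Int.ofNat m)).getD []

-- ===== PRECONDITION & SPEC =====
def Spec_generate_suggested_questions_py (user_message : String) (tool_calls : List (List (String × String))) (out : List String) : Prop := out = generate_suggested_questions_py_alt user_message tool_calls
instance (user_message : String) (tool_calls : List (List (String × String))) (out : List String) : Decidable (Spec_generate_suggested_questions_py user_message tool_calls out) := by unfold Spec_generate_suggested_questions_py; infer_instance

-- ===== CLAIM (what is proved, stated in full; the proofs are below) =====
def Claim_equal_generate_suggested_questions_py : Prop := ∀ (user_message : String) (tool_calls : List (List (String × String))), Dom_generate_suggested_questions_py user_message tool_calls → Spec_generate_suggested_questions_py user_message tool_calls (generate_suggested_questions_py user_message tool_calls)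

-- ===== LEMMAS AND PROOFS =====

-- pvBits evaluates to the literal four-entry dict
theorem pv_bits_mk : pvBits = PySem.Dict.mk
    [("get_study_spots", 1), ("get_dining_options", 2), ("get_support_resources", 4), ("get_course_info", 8)] := by
  decide

-- the bit contributed by one tool call, characterised by the four name tests
theorem pv_bit_eq (tc : List (String × String)) :
    (match pvTcName tc with
     | none => 0
     | some s => pvBits.getD s 0) =
    (cond (pvTcName tc == some "get_study_spots") 1 0) |||
    (cond (pvTcName tc == some "get_dining_options") 2 0) |||
    (cond (pvTcName tc == some "get_support_resources") 4 0) |||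
    (cond (pvTcName tc == some "get_course_info") 8 0) := by
  cases h : pvTcName tc with
  | none => rfl
  | some s =>
    by_cases h1 : s = "get_study_spots"
    · subst h1; rfl
    · by_cases h2 : s = "get_dining_options"
      · subst h2; rfl
      · by_cases h3 : s = "get_support_resources"
        · subst h3; rfl
        · by_cases h4 : s = "get_course_info"
          · subst h4; rfl
          · rw [pv_bits_mk]
            have b1 : ("get_study_spots" == s) = false := by simp [Ne.symm h1]
            have b2 : ("get_dining_options" == s) = false := by simp [Ne.symm h2]
            have b3 : ("get_support_resources" == s) = false := by simp [Ne.symm h3]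
            have b4 : ("get_course_info" == s) = false := by simp [Ne.symm h4]
            simp [PySem.Dict.getD_eq_get?_getD, PySem.Dict.get?, List.find?,
              Bool.cond_eq_ite, beq_iff_eq, b1, b2, b3, b4, h1, h2, h3, h4]

theorem pv_lor_left_comm (a b c : Nat) : a ||| (b ||| c) = b ||| (a ||| c) := by
  rw [← Nat.lor_assoc, Nat.lor_comm a b, Nat.lor_assoc]

theorem pv_cond_or (a b : Bool) (k : Nat) :
    cond (a || b) k 0 = cond a k 0 ||| cond b k 0 := by
  cases a <;> cases b <;> simp

-- the mask value as a function of the four any() tests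
def pvMaskOf (tcs : List (List (String × String))) : Nat :=
  (cond (tcs.any (fun tc => pvTcName tc == some "get_study_spots")) 1 0) |||
  (cond (tcs.any (fun tc => pvTcName tc == some "get_dining_options")) 2 0) |||
  (cond (tcs.any (fun tc => pvTcName tc == some "get_support_resources")) 4 0) |||
  (cond (tcs.any (fun tc => pvTcName tc == some "get_course_info")) 8 0)

theorem pv_fold_mask (tcs : List (List (String × String))) : ∀ m : Nat,
    tcs.foldl (fun m tc =>
      m ||| (match pvTcName tc with
             | none => 0
             | some s => pvBits.getD s 0)) m = m ||| pvMaskOf tcs := by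
  induction tcs with
  | nil => intro m; simp [pvMaskOf]
  | cons tc tcs ih =>
    intro m
    simp only [List.foldl_cons]
    rw [ih]
    simp only [pv_bit_eq, pvMaskOf, List.any_cons, pv_cond_or]
    generalize cond (pvTcName tc == some "get_study_spots") 1 0 = c0
    generalize cond (pvTcName tc == some "get_dining_options") 2 0 = c1
    generalize cond (pvTcName tc == some "get_support_resources") 4 0 = c2
    generalize cond (pvTcName tc == some "get_course_info") 8 0 = c3
    generalize cond (tcs.any fun tc => pvTcName tc == some "get_study_spots") 1 0 = C0
    generalize cond (tcs.any fun tc => pvTcName tc == some "get_dining_options") 2 0 = C1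
    generalize cond (tcs.any fun tc => pvTcName tc == some "get_support_resources") 4 0 = C2
    generalize cond (tcs.any fun tc => pvTcName tc == some "get_course_info") 8 0 = C3
    simp only [Nat.lor_assoc]
    rw [pv_lor_left_comm C0 c1, pv_lor_left_comm C1 c2, pv_lor_left_comm C0 c2,
        pv_lor_left_comm C2 c3, pv_lor_left_comm C1 c3, pv_lor_left_comm C0 c3]

-- ===== VERDICT (by name: the statement is the Claim_ definition above) =====
theorem generate_suggested_questions_py_spec : Claim_equal_generate_suggested_questions_py := by
  intro um tcs _
  unfold Spec_generate_suggested_questions_py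
  unfold generate_suggested_questions_py generate_suggested_questions_py_alt
  simp only [pv_fold_mask, Nat.zero_or, pvMaskOf]
  cases tcs.any (fun tc => pvTcName tc == some "get_study_spots") <;>
    cases tcs.any (fun tc => pvTcName tc == some "get_dining_options") <;>
      cases tcs.any (fun tc => pvTcName tc == some "get_support_resources") <;>
        cases tcs.any (fun tc => pvTcName tc == some "get_course_info") <;> rfl
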